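-- pv_equiv track=rewrite | github.com/dandypst/T-Neo.V0 | teneo_bot.py | _pick_agent
-- ===== SOURCE A (Python) =====
-- KNOWN_AGENTS = [
--     "crypto-tracker-ai-v2",    # Crypto Tracker — murah, recommended
--     "trading-knowledge-agent",  # Trading Agent
--     "gas-sniper-agent",         # Gas War Sniper
--     "amazon",                   # Amazon
--     "x-agent-enterprise-v2",   # X Platform Agent (lebih mahal)
-- ]
--
-- def _pick_agent(agents):
--     """Pilih agent online termurah."""
--     online_ids = {a.get("id") for a in agents if a.get("status") == "online"}
--     for preferred in KNOWN_AGENTS: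
--         if preferred in online_ids:
--             return preferred
--     # Fallback: agent pertama yang online
--     for a in agents:
--         if a.get("status") == "online":
--             return a.get("id", "crypto-tracker-ai-v2")
--     return "crypto-tracker-ai-v2"
-- ===== SOURCE B (Python) =====
-- KNOWN_AGENTS = [
--     "crypto-tracker-ai-v2",
--     "trading-knowledge-agent",
--     "gas-sniper-agent",
--     "amazon",
--     "x-agent-enterprise-v2",
-- ]
--
-- def _pick_agent(agents):
--     """Single pass: track the best (lowest) preference rank seen among online
--     agents and the first online agent, instead of building an id set and
--     rescanning the preference list and the agent list."""
--     rank = {aid: i for i, aid in enumerate(KNOWN_AGENTS)}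
--     best_rank = None
--     first_online = None
--     for a in agents:
--         if a.get("status") == "online":
--             if first_online is None:
--                 first_online = a
--             r = rank.get(a.get("id"))
--             if r is not None and (best_rank is None or r < best_rank):
--                 best_rank = r
--     if best_rank is not None:
--         return KNOWN_AGENTS[best_rank]
--     if first_online is not None:
--         return first_online.get("id", "crypto-tracker-ai-v2")
--     return "crypto-tracker-ai-v2"
-- ===== Notes on version B (the rewrite author's own statement) =====
-- stated objective: alternative
-- what changed: Replaced A's set comprehension plus two rescans (over KNOWN_AGENTS and over agents) with a single pass over agents that tracks the minimal preference rank seen and the first online agent.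
import Mathlib
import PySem

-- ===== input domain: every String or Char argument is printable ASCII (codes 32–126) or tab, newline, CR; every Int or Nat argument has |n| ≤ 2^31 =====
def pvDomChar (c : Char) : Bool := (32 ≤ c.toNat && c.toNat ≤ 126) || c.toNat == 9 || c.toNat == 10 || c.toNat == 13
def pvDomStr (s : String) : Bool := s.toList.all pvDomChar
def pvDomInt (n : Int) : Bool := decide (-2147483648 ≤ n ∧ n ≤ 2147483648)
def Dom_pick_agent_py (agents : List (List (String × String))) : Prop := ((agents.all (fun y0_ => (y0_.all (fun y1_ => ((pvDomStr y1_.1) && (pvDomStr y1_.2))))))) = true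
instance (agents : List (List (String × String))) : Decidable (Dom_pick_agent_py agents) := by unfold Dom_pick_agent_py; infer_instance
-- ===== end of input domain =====

-- B is an alternative decomposition: a single pass over agents tracking the minimal
-- preference rank and the first online agent, instead of A's id set plus two rescans.

-- KNOWN_AGENTS (module constant used by both versions); pvOnl is the shared test
-- a.get("status") == "online".
def pvKnownAgents : List String :=
  ["crypto-tracker-ai-v2", "trading-knowledge-agent", "gas-sniper-agent",
   "amazon", "x-agent-enterprise-v2"]

-- shared: a.get("status") == "online"
def pvOnl (a : List (String × String)) : Bool :=
  PySem.Dict.get? (PySem.Dict.mk a) "status" == some "online"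

-- ===== PORT A =====
def pick_agent_py (agents : List (List (String × String))) : String :=
  let online_ids : PySem.Set (Option String) :=
    PySem.Set.ofList
      ((agents.filter (fun a => pvOnl a)).map (fun a => PySem.Dict.get? (PySem.Dict.mk a) "id"))
  match pvKnownAgents.find? (fun preferred => online_ids.contains (some preferred)) with
  | some preferred => preferred
  | none =>
    match agents.find? (fun a => pvOnl a) with
    | some a => PySem.Dict.getD (PySem.Dict.mk a) "id" "crypto-tracker-ai-v2"
    | none => "crypto-tracker-ai-v2"

-- ===== PORT B =====
-- rank = {aid: i for i, aid in enumerate(KNOWN_AGENTS)}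
def pvRank : PySem.Dict String Int :=
  (PySem.List.enumerate pvKnownAgents).foldl (fun d p => d.insert p.2 p.1) (PySem.Dict.mk [])

def pvRk (a : List (String × String)) : Option Int :=
  match PySem.Dict.get? (PySem.Dict.mk a) "id" with
  | none => none
  | some s => PySem.Dict.get? pvRank s

def pvStep (st : Option Int × Option (List (String × String)))
    (a : List (String × String)) : Option Int × Option (List (String × String)) :=
  if pvOnl a then
    let fo := match st.2 with | none => some a | some b => some b
    let br := match pvRk a with
      | none => st.1
      | some r => match st.1 with
        | none => some r
        | some b => if r < b then some r else some b
    (br, fo)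
  else st

def pick_agent_py_alt (agents : List (List (String × String))) : String :=
  let st := agents.foldl pvStep (none, none)
  match st.1 with
  | some r => (PySem.List.pyGet? pvKnownAgents r).getD ""
  | none => match st.2 with
    | some a => PySem.Dict.getD (PySem.Dict.mk a) "id" "crypto-tracker-ai-v2"
    | none => "crypto-tracker-ai-v2"


-- ===== PRECONDITION & SPEC =====
def Spec_pick_agent_py (agents : List (List (String × String))) (out : String) : Prop := out = pick_agent_py_alt agents
instance (agents : List (List (String × String))) (out : String) : Decidable (Spec_pick_agent_py agents out) := by unfold Spec_pick_agent_py; infer_instance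

-- ===== CLAIM (what is proved, stated in full; the proofs are below) =====
def Claim_equal_pick_agent_py : Prop := ∀ (agents : List (List (String × String))), Dom_pick_agent_py agents → Spec_pick_agent_py agents (pick_agent_py agents)

-- ===== LEMMAS AND PROOFS =====

-- proof-side defs
def pvP (agents : List (List (String × String))) (k : String) : Bool :=
  (PySem.Set.ofList
      ((agents.filter (fun a => pvOnl a)).map (fun a => PySem.Dict.get? (PySem.Dict.mk a) "id"))).contains (some k)

def pvRanks (agents : List (List (String × String))) : List Int :=
  agents.filterMap (fun a => if pvOnl a then pvRk a else none)

def pvMStep (o : Option Int) (r : Int) : Option Int :=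
  match o with | none => some r | some b => if r < b then some r else some b

lemma A_eq (agents : List (List (String × String))) : pick_agent_py agents =
  match pvKnownAgents.find? (fun k => pvP agents k) with
  | some p => p
  | none => match agents.find? (fun a => pvOnl a) with
    | some a => PySem.Dict.getD (PySem.Dict.mk a) "id" "crypto-tracker-ai-v2"
    | none => "crypto-tracker-ai-v2" := rfl

lemma fold_char (agents : List (List (String × String))) :
    ∀ (b : Option Int) (f : Option (List (String × String))),
    agents.foldl pvStep (b, f) = ((pvRanks agents).foldl pvMStep b,
      match f with | some x => some x | none => agents.find? (fun a => pvOnl a)) := by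
  induction agents with
  | nil => intro b f; cases f <;> simp [pvRanks]
  | cons a as ih =>
    intro b f
    by_cases h : pvOnl a
    · have hstep : pvStep (b, f) a =
        ((match pvRk a with
          | none => b
          | some r => pvMStep b r),
         (match f with | none => some a | some b' => some b')) := by
        simp [pvStep, h, pvMStep]
      rw [List.foldl_cons, hstep, ih]
      have hranks : pvRanks (a :: as) =
          match pvRk a with
          | none => pvRanks as
          | some r => r :: pvRanks as := by
        simp only [pvRanks, List.filterMap_cons, h, if_pos]
        cases pvRk a <;> simp
      rw [hranks]
      have hfind : (a :: as).find? (fun a => pvOnl a) = some a := by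
        simp [List.find?_cons_of_pos, h]
      cases hrk : pvRk a <;> cases f <;> simp [hfind]
    · have hstep : pvStep (b, f) a = (b, f) := by simp [pvStep, h]
      rw [List.foldl_cons, hstep, ih]
      have hranks : pvRanks (a :: as) = pvRanks as := by
        simp only [pvRanks, List.filterMap_cons, h, Bool.false_eq_true, ite_false]
      have hfind : (a :: as).find? (fun a => pvOnl a) = as.find? (fun a => pvOnl a) :=
        List.find?_cons_of_neg (by simp [h])
      rw [hranks, hfind]

lemma B_eq (agents : List (List (String × String))) : pick_agent_py_alt agents =
  match (pvRanks agents).foldl pvMStep none with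
  | some r => (PySem.List.pyGet? pvKnownAgents r).getD ""
  | none => match agents.find? (fun a => pvOnl a) with
    | some a => PySem.Dict.getD (PySem.Dict.mk a) "id" "crypto-tracker-ai-v2"
    | none => "crypto-tracker-ai-v2" := by
  unfold pick_agent_py_alt
  rw [fold_char]

lemma mfold_some : ∀ (l : List Int) (b : Int), l.foldl pvMStep (some b) = some (l.foldl min b) := by
  intro l
  induction l with
  | nil => intro b; rfl
  | cons r t ih =>
    intro b
    have : pvMStep (some b) r = some (min b r) := by
      show (if r < b then some r else some b) = some (min b r)
      by_cases h : r < b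
      · rw [if_pos h, min_eq_right h.le]
      · rw [if_neg h, min_eq_left (not_lt.mp h)]
    rw [List.foldl_cons, this, ih, List.foldl_cons]

lemma rank_get (s : String) (j : Int) : PySem.Dict.get? pvRank s = some j ↔
    (s = "crypto-tracker-ai-v2" ∧ j = 0) ∨ (s = "trading-knowledge-agent" ∧ j = 1) ∨
    (s = "gas-sniper-agent" ∧ j = 2) ∨ (s = "amazon" ∧ j = 3) ∨
    (s = "x-agent-enterprise-v2" ∧ j = 4) := by
  have h : pvRank = PySem.Dict.mk
      [("crypto-tracker-ai-v2", 0), ("trading-knowledge-agent", 1), ("gas-sniper-agent", 2),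
       ("amazon", 3), ("x-agent-enterprise-v2", 4)] := by decide
  rw [h]
  simp only [PySem.Dict.get?_mk_cons, beq_iff_eq]
  split_ifs with h0 h1 h2 h3 h4
  · subst h0; simp; omega
  · subst h1; simp; omega
  · subst h2; simp; omega
  · subst h3; simp; omega
  · subst h4; simp; omega
  · constructor
    · intro h
      rw [show ({ items := [] } : PySem.Dict String Int).get? s = none from rfl] at h
      exact absurd h (by simp)
    · rintro (⟨hs, hj⟩ | ⟨hs, hj⟩ | ⟨hs, hj⟩ | ⟨hs, hj⟩ | ⟨hs, hj⟩) <;>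
        first
          | exact absurd hs.symm h0
          | exact absurd hs.symm h1
          | exact absurd hs.symm h2
          | exact absurd hs.symm h3
          | exact absurd hs.symm h4

lemma P_iff (agents : List (List (String × String))) (k : String) :
    pvP agents k = true ↔ ∃ a ∈ agents, pvOnl a = true ∧
      PySem.Dict.get? (PySem.Dict.mk a) "id" = some k := by
  unfold pvP
  rw [PySem.Set.contains_iff, PySem.Set.mem_ofList]
  simp [List.mem_map, List.mem_filter]
  tauto

lemma mem_ranks_iff (agents : List (List (String × String))) (j : Int) :
    j ∈ pvRanks agents ↔ ∃ a ∈ agents, pvOnl a = true ∧ pvRk a = some j := by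
  unfold pvRanks
  rw [List.mem_filterMap]
  constructor
  · rintro ⟨a, ha, h⟩
    by_cases ho : pvOnl a
    · rw [if_pos ho] at h; exact ⟨a, ha, ho, h⟩
    · rw [if_neg ho] at h; exact absurd h (by simp)
  · rintro ⟨a, ha, ho, h⟩
    exact ⟨a, ha, by rw [if_pos ho]; exact h⟩

lemma ranks_bound (agents : List (List (String × String))) :
    ∀ x ∈ pvRanks agents, 0 ≤ x ∧ x < 5 := by
  intro x hx
  rcases (mem_ranks_iff agents x).mp hx with ⟨a, _, _, h⟩
  unfold pvRk at h
  rcases hid : PySem.Dict.get? (PySem.Dict.mk a) "id" with _ | s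
  · rw [hid] at h; exact absurd h (by simp)
  · rw [hid] at h
    rcases (rank_get s x).mp h with ⟨_, h⟩ | ⟨_, h⟩ | ⟨_, h⟩ | ⟨_, h⟩ | ⟨_, h⟩ <;> omega

lemma P_iff_rank (agents : List (List (String × String))) (j : Int) (k : String)
    (h1 : ∀ s, PySem.Dict.get? pvRank s = some j ↔ s = k) :
    (pvP agents k = true ↔ j ∈ pvRanks agents) := by
  rw [P_iff, mem_ranks_iff]
  constructor
  · rintro ⟨a, ha, ho, hid⟩
    refine ⟨a, ha, ho, ?_⟩
    unfold pvRk; rw [hid]; exact (h1 k).mpr rfl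
  · rintro ⟨a, ha, ho, hr⟩
    refine ⟨a, ha, ho, ?_⟩
    unfold pvRk at hr
    rcases hid : PySem.Dict.get? (PySem.Dict.mk a) "id" with _ | s
    · rw [hid] at hr; exact absurd hr (by simp)
    · rw [hid] at hr
      have hr' : PySem.Dict.get? pvRank s = some j := hr
      rw [(h1 s).mp hr']

lemma rank_eq0 : ∀ s, PySem.Dict.get? pvRank s = some 0 ↔ s = "crypto-tracker-ai-v2" := by
  intro s; rw [rank_get]
  constructor
  · rintro (⟨hs, hj⟩ | ⟨hs, hj⟩ | ⟨hs, hj⟩ | ⟨hs, hj⟩ | ⟨hs, hj⟩) <;> first | exact hs | omega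
  · intro hs; subst hs; exact Or.inl ⟨rfl, rfl⟩

lemma rank_eq1 : ∀ s, PySem.Dict.get? pvRank s = some 1 ↔ s = "trading-knowledge-agent" := by
  intro s; rw [rank_get]
  constructor
  · rintro (⟨hs, hj⟩ | ⟨hs, hj⟩ | ⟨hs, hj⟩ | ⟨hs, hj⟩ | ⟨hs, hj⟩) <;> first | exact hs | omega
  · intro hs; subst hs; exact Or.inr (Or.inl ⟨rfl, rfl⟩)

lemma rank_eq2 : ∀ s, PySem.Dict.get? pvRank s = some 2 ↔ s = "gas-sniper-agent" := by
  intro s; rw [rank_get]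
  constructor
  · rintro (⟨hs, hj⟩ | ⟨hs, hj⟩ | ⟨hs, hj⟩ | ⟨hs, hj⟩ | ⟨hs, hj⟩) <;> first | exact hs | omega
  · intro hs; subst hs; exact Or.inr (Or.inr (Or.inl ⟨rfl, rfl⟩))

lemma rank_eq3 : ∀ s, PySem.Dict.get? pvRank s = some 3 ↔ s = "amazon" := by
  intro s; rw [rank_get]
  constructor
  · rintro (⟨hs, hj⟩ | ⟨hs, hj⟩ | ⟨hs, hj⟩ | ⟨hs, hj⟩ | ⟨hs, hj⟩) <;> first | exact hs | omega
  · intro hs; subst hs; exact Or.inr (Or.inr (Or.inr (Or.inl ⟨rfl, rfl⟩)))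

lemma rank_eq4 : ∀ s, PySem.Dict.get? pvRank s = some 4 ↔ s = "x-agent-enterprise-v2" := by
  intro s; rw [rank_get]
  constructor
  · rintro (⟨hs, hj⟩ | ⟨hs, hj⟩ | ⟨hs, hj⟩ | ⟨hs, hj⟩ | ⟨hs, hj⟩) <;> first | exact hs | omega
  · intro hs; subst hs; exact Or.inr (Or.inr (Or.inr (Or.inr ⟨rfl, rfl⟩)))

theorem main_eq (agents : List (List (String × String))) :
    pick_agent_py agents = pick_agent_py_alt agents := by
  rw [A_eq, B_eq]
  rcases hR : pvRanks agents with _ | ⟨r, l⟩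
  · have hf : pvKnownAgents.find? (fun k => pvP agents k) = none := by
      apply List.find?_eq_none.mpr
      intro x hx hc
      have hmem : ∀ (j : Int) (k : String),
          (∀ s, PySem.Dict.get? pvRank s = some j ↔ s = k) → pvP agents k = true → False := by
        intro j k h1 hk
        have := (P_iff_rank agents j k h1).mp hk
        rw [hR] at this
        simp at this
      rcases (show x = "crypto-tracker-ai-v2" ∨ x = "trading-knowledge-agent" ∨
          x = "gas-sniper-agent" ∨ x = "amazon" ∨ x = "x-agent-enterprise-v2" from by
            simpa [pvKnownAgents] using hx) with rfl | rfl | rfl | rfl | rfl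
      · exact hmem 0 _ rank_eq0 hc
      · exact hmem 1 _ rank_eq1 hc
      · exact hmem 2 _ rank_eq2 hc
      · exact hmem 3 _ rank_eq3 hc
      · exact hmem 4 _ rank_eq4 hc
    rw [hf]
    rfl
  · have hmin : List.foldl pvMStep none (r :: l) = some (l.foldl min r) := by
      rw [List.foldl_cons]
      exact mfold_some l r
    have hsome : (r :: l).min? = some (l.foldl min r) := rfl
    obtain ⟨hmem0, hle0⟩ := List.min?_eq_some_iff.mp hsome
    generalize hm : l.foldl min r = m at hmin hmem0 hle0
    have hmem : m ∈ pvRanks agents := hR ▸ hmem0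
    have hle : ∀ b ∈ pvRanks agents, m ≤ b := by rw [hR]; exact hle0
    obtain ⟨hb1, hb2⟩ := ranks_bound agents m hmem
    rw [hmin]
    have hno : ∀ (j : Int) (k : String), j < m →
        (∀ s, PySem.Dict.get? pvRank s = some j ↔ s = k) → ¬ pvP agents k = true := by
      intro j k hj h1 hc
      have := hle j ((P_iff_rank agents j k h1).mp hc)
      omega
    interval_cases m
    · rw [show pvKnownAgents = ["crypto-tracker-ai-v2", "trading-knowledge-agent",
        "gas-sniper-agent", "amazon", "x-agent-enterprise-v2"] from rfl,
        List.find?_cons_of_pos ((P_iff_rank agents 0 _ rank_eq0).mpr hmem)]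
      rfl
    · rw [show pvKnownAgents = ["crypto-tracker-ai-v2", "trading-knowledge-agent",
        "gas-sniper-agent", "amazon", "x-agent-enterprise-v2"] from rfl,
        List.find?_cons_of_neg (hno 0 _ (by omega) rank_eq0),
        List.find?_cons_of_pos ((P_iff_rank agents 1 _ rank_eq1).mpr hmem)]
      rfl
    · rw [show pvKnownAgents = ["crypto-tracker-ai-v2", "trading-knowledge-agent",
        "gas-sniper-agent", "amazon", "x-agent-enterprise-v2"] from rfl,
        List.find?_cons_of_neg (hno 0 _ (by omega) rank_eq0),
        List.find?_cons_of_neg (hno 1 _ (by omega) rank_eq1),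
        List.find?_cons_of_pos ((P_iff_rank agents 2 _ rank_eq2).mpr hmem)]
      rfl
    · rw [show pvKnownAgents = ["crypto-tracker-ai-v2", "trading-knowledge-agent",
        "gas-sniper-agent", "amazon", "x-agent-enterprise-v2"] from rfl,
        List.find?_cons_of_neg (hno 0 _ (by omega) rank_eq0),
        List.find?_cons_of_neg (hno 1 _ (by omega) rank_eq1),
        List.find?_cons_of_neg (hno 2 _ (by omega) rank_eq2),
        List.find?_cons_of_pos ((P_iff_rank agents 3 _ rank_eq3).mpr hmem)]
      rfl
    · rw [show pvKnownAgents = ["crypto-tracker-ai-v2", "trading-knowledge-agent",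
        "gas-sniper-agent", "amazon", "x-agent-enterprise-v2"] from rfl,
        List.find?_cons_of_neg (hno 0 _ (by omega) rank_eq0),
        List.find?_cons_of_neg (hno 1 _ (by omega) rank_eq1),
        List.find?_cons_of_neg (hno 2 _ (by omega) rank_eq2),
        List.find?_cons_of_neg (hno 3 _ (by omega) rank_eq3),
        List.find?_cons_of_pos ((P_iff_rank agents 4 _ rank_eq4).mpr hmem)]
      rfl

-- ===== VERDICT (by name: the statement is the Claim_ definition above) =====
theorem pick_agent_py_spec : Claim_equal_pick_agent_py := by
  intro agents _
  unfold Spec_pick_agent_py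
  exact main_eq agents
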